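-- pv_equiv track=rewrite | github.com/thealper2/codewars-solutions | 7-kyu/weird_words.py | next_letter
-- ===== SOURCE A (Python) =====
-- def next_letter(s):
--     result = []
--     for char in s:
--         if char.isalpha():
--             if char == "z":
--                 next_char = "a"
--             elif char == "Z":
--                 next_char = "A"
--             else:
--                 next_char = chr(ord(char) + 1)
--             result.append(next_char)
--         else:
--             result.append(char)
--
--     return "".join(result)
-- ===== SOURCE B (Python) =====
-- def next_letter(s):
--     lower = "abcdefghijklmnopqrstuvwxyz"
--     upper = lower.upper()
--     table = str.maketrans(lower + upper,
--                           lower[1:] + lower[0] + upper[1:] + upper[0])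
--     return s.translate(table)
-- ===== Notes on version B (the rewrite author's own statement) =====
-- stated objective: idiomatic
-- what changed: Replaces the explicit loop with per-character branching by a precomputed 52-entry translation table (str.maketrans from rotated alphabets) applied in one s.translate call.
import Mathlib
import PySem

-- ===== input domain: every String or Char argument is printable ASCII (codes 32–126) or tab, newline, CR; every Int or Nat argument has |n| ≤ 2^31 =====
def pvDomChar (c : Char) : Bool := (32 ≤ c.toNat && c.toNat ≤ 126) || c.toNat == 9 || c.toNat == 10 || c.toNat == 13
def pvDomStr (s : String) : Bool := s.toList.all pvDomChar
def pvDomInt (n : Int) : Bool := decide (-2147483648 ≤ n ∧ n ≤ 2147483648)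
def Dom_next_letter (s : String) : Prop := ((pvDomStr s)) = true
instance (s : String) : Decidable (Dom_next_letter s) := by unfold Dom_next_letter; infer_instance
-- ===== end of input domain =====

-- B replaces A's explicit loop with branches by a precomputed 52-entry translation table applied per character (no speed claim).

-- ===== PORT A =====
def next_letter (s : String) : String :=
  -- result = []; for char in s: … ; return "".join(result)
  String.mk (s.toList.foldl (fun result char =>
    if PySem.Chars.isalpha char then
      result ++ [if char = 'z' then 'a'
                 else if char = 'Z' then 'A'
                 else Char.ofNat (char.toNat + 1)]   -- chr(ord(char) + 1); exact on Dom (letters stay < 0xd800)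
    else result ++ [char]) [])

-- ===== PORT B =====
-- str.maketrans(src, dst) = the char-to-char table; s.translate = per-char lookup, identity when absent
def nlTable : List (Char × Char) :=
  let lower := "abcdefghijklmnopqrstuvwxyz".toList
  let upper := PySem.Chars.upper lower
  -- lower[1:] + lower[0] etc.: slices of a literal, written as drop/take (exact here)
  (lower ++ upper).zip ((lower.drop 1 ++ lower.take 1) ++ (upper.drop 1 ++ upper.take 1))

def next_letter_alt (s : String) : String :=
  String.mk (s.toList.map (fun c => ((nlTable.lookup c).getD c)))

-- ===== PRECONDITION & SPEC =====
def Spec_next_letter (s : String) (out : String) : Prop := out = next_letter_alt s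
instance (s : String) (out : String) : Decidable (Spec_next_letter s out) := by unfold Spec_next_letter; infer_instance

-- ===== CLAIM (what is proved, stated in full; the proofs are below) =====
def Claim_equal_next_letter : Prop := ∀ (s : String), Dom_next_letter s → Spec_next_letter s (next_letter s)

-- ===== LEMMAS AND PROOFS =====

-- A's per-character value
def nlStepA (char : Char) : Char :=
  if PySem.Chars.isalpha char then
    (if char = 'z' then 'a' else if char = 'Z' then 'A' else Char.ofNat (char.toNat + 1))
  else char

lemma nl_foldl_eq_map (l : List Char) (acc : List Char) :
    l.foldl (fun result char =>
      if PySem.Chars.isalpha char then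
        result ++ [if char = 'z' then 'a'
                   else if char = 'Z' then 'A'
                   else Char.ofNat (char.toNat + 1)]
      else result ++ [char]) acc = acc ++ l.map nlStepA := by
  induction l generalizing acc with
  | nil => simp
  | cons c t ih =>
    simp only [List.foldl_cons, List.map_cons, ih, nlStepA]
    split_ifs <;> simp

-- the two per-character functions agree on every domain character (finite check over codes 0–126)
lemma nl_char_agree (c : Char) (h : pvDomChar c = true) :
    nlStepA c = (nlTable.lookup c).getD c := by
  have hlt : c.toNat < 127 := by
    simp only [pvDomChar, Bool.or_eq_true, Bool.and_eq_true, decide_eq_true_eq, beq_iff_eq] at h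
    omega
  have hc : Char.ofNat c.toNat = c := Char.ofNat_toNat c
  have key : (List.range 127).all
      (fun n => nlStepA (Char.ofNat n) == (nlTable.lookup (Char.ofNat n)).getD (Char.ofNat n)) = true := by
    decide
  have := List.all_eq_true.mp key c.toNat (List.mem_range.mpr hlt)
  rw [hc] at this
  exact beq_iff_eq.mp this

lemma nl_map_agree (l : List Char) (h : l.all pvDomChar = true) :
    l.map nlStepA = l.map (fun c => ((nlTable.lookup c).getD c)) := by
  induction l with
  | nil => rfl
  | cons c t ih =>
    simp only [List.all_cons, Bool.and_eq_true] at h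
    simp [nl_char_agree c h.1, ih h.2]

-- ===== VERDICT (by name: the statement is the Claim_ definition above) =====
theorem next_letter_spec : Claim_equal_next_letter := by
  intro s hdom
  unfold Spec_next_letter next_letter next_letter_alt
  rw [nl_foldl_eq_map]
  simp only [List.nil_append]
  exact congrArg String.mk (nl_map_agree _ hdom)
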